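-- pv_equiv track=rewrite | github.com/MacNaughty/Puzzles | Python3/Algorithms/Sorting/Insertion Sort Advanced Analysis (dict incomplete2).py | collect_numbers_and_indices
-- ===== SOURCE A (Python) =====
-- from collections import OrderedDict
--
-- def collect_numbers_and_indices(full_list):
--
--     count = 0
--
--
--     # elements_and_first_occurrence is of the form: {number : last_consecutive_index}
--     elements_and_first_occurrence = OrderedDict()
--     elements_and_first_occurrence[full_list[0]] = 0
--     last_element = full_list[0]
--
--     index_increment = dict()
--
--
--     for i in range(1, len(full_list)):
--         number_being_placed = full_list[i]
--
--
--         # if the number, lst[i], is not already a key in the dictionary,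
--         #   add the number as the key, and the last consecutive index as the value
--         #   (we ignore the first set of consecutive elements to increase efficiency)
--         #   (e.g. [1, 1, 1, 3, 2] becomes {1 : 2, 3 : 3, 2 : 4}
--         #       for a large set of unique numbers, this might actually be slower
--         if not number_being_placed in elements_and_first_occurrence:
--             elements_and_first_occurrence[number_being_placed] = i
--             last_element = number_being_placed
--
--
--         # if lst[i] is already a key in the dictionary and is now occurring consecutively,
--         #   increment its index (value) by 1
--         elif number_being_placed == last_element:
--             elements_and_first_occurrence[number_being_placed] += 1
--
--         # if lst[i] IS already a key in the main dictionary and is NOT occurring consecutively,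
--         #else:
--             # add it to the dict and add corresponding increment value
--
--
--
--
--     return elements_and_first_occurrence
-- ===== SOURCE B (Python) =====
-- from itertools import groupby
--
--
-- def collect_numbers_and_indices(full_list):
--     # Run-based traversal: walk consecutive runs via groupby instead of single
--     # elements, keeping (result, most-recently-added value, running offset).
--     result = {}
--     last = None
--     offset = 0
--     for value, group in groupby(full_list):
--         runlen = sum(1 for _ in group)
--         if value not in result:
--             result[value] = offset + runlen - 1
--             last = value
--         elif value == last:
--             result[value] += runlen
--         offset += runlen
--     return result
-- ===== Notes on version B (the rewrite author's own statement) =====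
-- stated objective: alternative
-- what changed: B traverses the list as consecutive runs (itertools.groupby) with a running offset and per-run length arithmetic, instead of A's element-by-element index loop seeded from the first element; one dict update per run replaces one per element.
import Mathlib
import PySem

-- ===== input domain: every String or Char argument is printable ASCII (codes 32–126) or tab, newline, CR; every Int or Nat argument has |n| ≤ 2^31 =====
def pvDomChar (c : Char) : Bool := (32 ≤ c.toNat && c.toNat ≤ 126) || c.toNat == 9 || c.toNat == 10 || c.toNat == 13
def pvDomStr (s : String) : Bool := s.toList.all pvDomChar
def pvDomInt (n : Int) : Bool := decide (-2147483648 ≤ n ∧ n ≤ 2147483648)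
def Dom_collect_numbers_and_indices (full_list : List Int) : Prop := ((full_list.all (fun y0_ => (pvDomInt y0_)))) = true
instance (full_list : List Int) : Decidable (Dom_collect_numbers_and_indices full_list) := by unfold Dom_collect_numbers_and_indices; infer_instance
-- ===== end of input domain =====

-- B is a run-based (groupby) re-decomposition of A's per-element loop; same return value on
-- every non-empty list (A raises IndexError on [], see Pre_/Raises_ below).

-- ===== PORT A =====
-- one iteration of A's `for i in range(1, len(full_list))` body: state = (dict, last_element)
def pvA_step (st : PySem.Dict Int Int × Int) (i : Int) (number_being_placed : Int) :
    PySem.Dict Int Int × Int :=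
  if st.1.contains number_being_placed = false then
    (st.1.insert number_being_placed i, number_being_placed)
  else if number_being_placed = st.2 then
    (st.1.insert number_being_placed (st.1.getD number_being_placed 0 + 1), st.2)
  else st

def collect_numbers_and_indices (full_list : List Int) : List (Int × Int) :=
  match full_list with
  | [] => []  -- Python raises IndexError reading the first element; excluded by Pre_
  | x0 :: _ =>
    ((PySem.List.pyRange 1 (PySem.List.len full_list) 1).foldl
        (fun st i => pvA_step st i (PySem.List.pyGetD full_list i 0))
        (PySem.Dict.empty.insert x0 0, x0)).1.items

-- ===== PORT B =====
-- itertools.groupby: the list as (value, run-length) pairs of maximal consecutive runs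
def pvRunsAux (v : Int) (k : Nat) : List Int → List (Int × Nat)
  | [] => [(v, k)]
  | x :: xs => if x = v then pvRunsAux v (k + 1) xs else (v, k) :: pvRunsAux x 1 xs

def pvRuns : List Int → List (Int × Nat)
  | [] => []
  | x :: xs => pvRunsAux x 1 xs

-- one iteration of B's loop body: state = (result, last, offset)
def pvB_step (st : PySem.Dict Int Int × Option Int × Int) (r : Int × Nat) :
    PySem.Dict Int Int × Option Int × Int :=
  if st.1.contains r.1 = false then
    (st.1.insert r.1 (st.2.2 + (r.2 : Int) - 1), some r.1, st.2.2 + (r.2 : Int))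
  else if some r.1 = st.2.1 then
    (st.1.insert r.1 (st.1.getD r.1 0 + (r.2 : Int)), st.2.1, st.2.2 + (r.2 : Int))
  else (st.1, st.2.1, st.2.2 + (r.2 : Int))

def collect_numbers_and_indices_alt (full_list : List Int) : List (Int × Int) :=
  ((pvRuns full_list).foldl pvB_step (PySem.Dict.empty, none, 0)).1.items

-- ===== PRECONDITION & SPEC =====
-- A reads the first element before its loop, so it raises IndexError on the empty list
-- (B's groupby loop returns the empty dict there).
def Pre_collect_numbers_and_indices (full_list : List Int) : Prop := full_list ≠ []
instance (full_list : List Int) : Decidable (Pre_collect_numbers_and_indices full_list) := by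
  unfold Pre_collect_numbers_and_indices; infer_instance
def pvWitness_collect_numbers_and_indices : List Int := [1, 1, 3, 2]

def Spec_collect_numbers_and_indices (full_list : List Int) (out : List (Int × Int)) : Prop :=
  out = collect_numbers_and_indices_alt full_list
instance (full_list : List Int) (out : List (Int × Int)) :
    Decidable (Spec_collect_numbers_and_indices full_list out) := by
  unfold Spec_collect_numbers_and_indices; infer_instance

-- ===== CLAIM (what is proved, stated in full; the proofs are below) =====
def Claim_equal_collect_numbers_and_indices : Prop :=
  ∀ (full_list : List Int), Dom_collect_numbers_and_indices full_list →
    Pre_collect_numbers_and_indices full_list →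
    Spec_collect_numbers_and_indices full_list (collect_numbers_and_indices full_list)

-- ===== LEMMAS AND PROOFS =====

-- A's loop as a structural recursion over the remaining elements, carrying the index
def pvProcA : List Int → Int → PySem.Dict Int Int × Int → PySem.Dict Int Int × Int
  | [], _, st => st
  | x :: xs, i, st => pvProcA xs (i + 1) (pvA_step st i x)

theorem pvProcA_eq_foldl_enumerate (l : List Int) (s : Int) (st : PySem.Dict Int Int × Int) :
    (PySem.List.enumerate l s).foldl (fun st p => pvA_step st p.1 p.2) st = pvProcA l s st := by
  induction l generalizing s st with
  | nil => simp [PySem.List.enumerate_nil, pvProcA]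
  | cons x xs ih => simp [PySem.List.enumerate_cons, pvProcA, List.foldl_cons, ih]

def pvFlattenRuns (rs : List (Int × Nat)) : List Int :=
  rs.flatMap (fun r => List.replicate r.2 r.1)

theorem pvFlatten_runsAux (xs : List Int) (v : Int) (k : Nat) :
    pvFlattenRuns (pvRunsAux v k xs) = List.replicate k v ++ xs := by
  induction xs generalizing v k with
  | nil => simp [pvRunsAux, pvFlattenRuns]
  | cons x xs ih =>
    by_cases h : x = v
    · subst h
      rw [pvRunsAux, if_pos rfl, ih, List.replicate_succ']
      simp
    · rw [pvRunsAux, if_neg h]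
      simp only [pvFlattenRuns, List.flatMap_cons] at ih ⊢
      rw [ih]
      simp

theorem pvRunsAux_pos (xs : List Int) (v : Int) (k : Nat) (hk : 1 ≤ k) :
    ∀ r ∈ pvRunsAux v k xs, 1 ≤ r.2 := by
  induction xs generalizing v k with
  | nil => intro r hr; simp [pvRunsAux] at hr; subst hr; exact hk
  | cons x xs ih =>
    intro r hr
    rw [pvRunsAux] at hr
    split at hr
    · exact ih v (k + 1) (by omega) r hr
    · rcases List.mem_cons.mp hr with h | h
      · subst h; exact hk
      · exact ih x 1 (by omega) r h

-- m+1 consecutive copies of a value already in the dict that equals `last`: m+1 increments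
theorem pvProcA_increments (m : Nat) (rest : List Int) (v : Int) :
    ∀ (i : Int) (d : PySem.Dict Int Int), d.contains v = true →
    pvProcA (List.replicate (m + 1) v ++ rest) i (d, v) =
      pvProcA rest (i + (m + 1 : Nat)) (d.insert v (d.getD v 0 + (m + 1 : Nat)), v) := by
  induction m with
  | zero =>
    intro i d hc
    simp only [List.replicate_succ, List.replicate_zero, List.nil_append, List.cons_append,
      pvProcA, pvA_step, hc]
    norm_num
  | succ m ih =>
    intro i d hc
    rw [List.replicate_succ, List.cons_append, pvProcA]
    have hstep : pvA_step (d, v) i v = (d.insert v (d.getD v 0 + 1), v) := by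
      simp [pvA_step, hc]
    rw [hstep, ih _ _ (PySem.Dict.contains_insert_self d v _)]
    rw [PySem.Dict.getD_insert_self, PySem.Dict.insert_insert_self]
    have h1 : i + 1 + ((m + 1 : Nat) : Int) = i + ((m + 1 + 1 : Nat) : Int) := by push_cast; ring
    have h2 : d.getD v 0 + 1 + ((m + 1 : Nat) : Int) = d.getD v 0 + ((m + 1 + 1 : Nat) : Int) := by
      push_cast; ring
    rw [h1, h2]

-- a run of a seen value different from `last`: the loop skips all of it
theorem pvProcA_skips (k : Nat) (rest : List Int) (v last : Int) (d : PySem.Dict Int Int)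
    (hc : d.contains v = true) (hne : v ≠ last) :
    ∀ i : Int, pvProcA (List.replicate k v ++ rest) i (d, last) = pvProcA rest (i + (k : Nat)) (d, last) := by
  induction k with
  | zero => intro i; simp
  | succ k ih =>
    intro i
    rw [List.replicate_succ, List.cons_append, pvProcA]
    have hstep : pvA_step (d, last) i v = (d, last) := by
      simp [pvA_step, hc, hne]
    rw [hstep, ih]
    have h1 : i + 1 + (k : Int) = i + ((k + 1 : Nat) : Int) := by push_cast; ring
    rw [h1]

-- one whole run, element-wise (A) = one B step
theorem pvProcA_run (v : Int) (k : Nat) (hk : 1 ≤ k) (rest : List Int) (i : Int)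
    (d : PySem.Dict Int Int) (last : Int) :
    pvProcA (List.replicate k v ++ rest) i (d, last) =
      pvProcA rest ((pvB_step (d, some last, i) (v, k)).2.2)
        ((pvB_step (d, some last, i) (v, k)).1,
         ((pvB_step (d, some last, i) (v, k)).2.1).getD last) := by
  by_cases hc : d.contains v = true
  · by_cases hvl : v = last
    · subst hvl
      obtain ⟨m, rfl⟩ : ∃ m, k = m + 1 := ⟨k - 1, by omega⟩
      rw [pvProcA_increments m rest v i d hc]
      simp [pvB_step, hc]
    · rw [pvProcA_skips k rest v last d hc hvl i]
      simp [pvB_step, hc, hvl]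
  · have hc' : d.contains v = false := by revert hc; cases d.contains v <;> simp
    obtain ⟨m, rfl⟩ : ∃ m, k = m + 1 := ⟨k - 1, by omega⟩
    rw [List.replicate_succ, List.cons_append, pvProcA]
    have hstep : pvA_step (d, last) i v = (d.insert v i, v) := by
      simp [pvA_step, hc']
    rw [hstep]
    cases m with
    | zero =>
      simp [pvB_step, hc']
    | succ m =>
      rw [pvProcA_increments m rest v (i + 1) (d.insert v i)
            (PySem.Dict.contains_insert_self d v i)]
      rw [PySem.Dict.getD_insert_self, PySem.Dict.insert_insert_self]
      simp only [pvB_step, hc', reduceIte, Option.getD_some]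
      have h1 : i + 1 + ((m + 1 : Nat) : Int) = i + ((m + 1 + 1 : Nat) : Int) := by push_cast; ring
      have h2 : i + ((m + 1 + 1 : Nat) : Int) - 1 = i + ((m + 1 : Nat) : Int) := by push_cast; ring
      rw [h1, h2]

-- the whole loop: A's element fold over the flattened runs = B's fold over the runs
theorem pvProcA_flatten (rs : List (Int × Nat)) (hpos : ∀ r ∈ rs, 1 ≤ r.2) (d : PySem.Dict Int Int)
    (last i : Int) :
    (pvProcA (pvFlattenRuns rs) i (d, last)).1 =
      (rs.foldl pvB_step (d, some last, i)).1 := by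
  induction rs generalizing d last i with
  | nil => simp [pvFlattenRuns, pvProcA]
  | cons r rs ih =>
    obtain ⟨v, k⟩ := r
    have hk : 1 ≤ k := hpos (v, k) List.mem_cons_self
    have hflat : pvFlattenRuns ((v, k) :: rs) = List.replicate k v ++ pvFlattenRuns rs := by
      simp [pvFlattenRuns]
    rw [hflat, pvProcA_run v k hk _ i d last, List.foldl_cons]
    have hlast : ∃ w, (pvB_step (d, some last, i) (v, k)).2.1 = some w := by
      simp only [pvB_step]
      split
      · exact ⟨v, rfl⟩
      · split
        · exact ⟨last, rfl⟩
        · exact ⟨last, rfl⟩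
    obtain ⟨w, hw⟩ := hlast
    rw [hw, Option.getD_some]
    have hst : pvB_step (d, some last, i) (v, k) =
        ((pvB_step (d, some last, i) (v, k)).1, some w, (pvB_step (d, some last, i) (v, k)).2.2) := by
      rw [← hw]
    rw [ih (fun r hr => hpos r (List.mem_cons_of_mem _ hr)), ← hst]

-- groupby of a non-empty list: a first run of the head value, then well-formed runs
theorem pvRuns_decomp (x0 : Int) (tl : List Int) :
    ∃ (k : Nat) (rs : List (Int × Nat)),
      pvRuns (x0 :: tl) = (x0, k + 1) :: rs ∧
      tl = List.replicate k x0 ++ pvFlattenRuns rs ∧ (∀ r ∈ rs, 1 ≤ r.2) := by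
  cases h : pvRunsAux x0 1 tl with
  | nil =>
    exfalso
    have hfl := pvFlatten_runsAux tl x0 1
    rw [h] at hfl
    simp [pvFlattenRuns] at hfl
  | cons r rs =>
    obtain ⟨v, k⟩ := r
    have hpos := pvRunsAux_pos tl x0 1 (le_refl 1)
    have hk : 1 ≤ k := hpos (v, k) (h ▸ List.mem_cons_self)
    obtain ⟨m, rfl⟩ : ∃ m, k = m + 1 := ⟨k - 1, by omega⟩
    have hfl := pvFlatten_runsAux tl x0 1
    rw [h] at hfl
    have hfl' : List.replicate (m + 1) v ++ pvFlattenRuns rs = x0 :: tl := by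
      simpa [pvFlattenRuns] using hfl
    rw [List.replicate_succ, List.cons_append] at hfl'
    obtain ⟨hv, htl⟩ := List.cons_eq_cons.mp hfl'
    subst hv
    refine ⟨m, rs, ?_, htl.symm, fun r hr => hpos r (h ▸ List.mem_cons_of_mem _ hr)⟩
    rw [pvRuns, h]

-- ===== VERDICT (by name: the statement is the Claim_ definition above) =====
theorem collect_numbers_and_indices_spec : Claim_equal_collect_numbers_and_indices := by
  intro l hdom hpre
  unfold Spec_collect_numbers_and_indices
  match l, hpre with
  | x0 :: tl, _ =>
    obtain ⟨k, rs, hruns, htl, hpos⟩ := pvRuns_decomp x0 tl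
    -- A's indexed fold over `range(1, len)` is `pvProcA` over the tail
    have hA : collect_numbers_and_indices (x0 :: tl) =
        (pvProcA tl 1 (PySem.Dict.empty.insert x0 0, x0)).1.items := by
      show ((PySem.List.pyRange 1 (PySem.List.len (x0 :: tl)) 1).foldl
          (fun st i => pvA_step st i (PySem.List.pyGetD (x0 :: tl) i 0))
          (PySem.Dict.empty.insert x0 0, x0)).1.items = _
      have hlen : (0 : Int) < PySem.List.len (x0 :: tl) := by
        simp [PySem.List.len_eq]
      have hmap : (PySem.List.pyRange 1 (PySem.List.len (x0 :: tl)) 1).map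
          (fun j => (j, PySem.List.pyGetD (x0 :: tl) j 0)) = PySem.List.enumerate tl 1 := by
        have he := PySem.List.enumerate_eq_map_pyRange (x0 :: tl) (0 : Int)
        rw [PySem.List.pyRange_one_cons hlen, List.map_cons,
          PySem.List.enumerate_cons] at he
        simp only [zero_add] at he
        exact ((List.cons_eq_cons.mp he).2).symm
      have hfold : (PySem.List.pyRange 1 (PySem.List.len (x0 :: tl)) 1).foldl
          (fun st i => pvA_step st i (PySem.List.pyGetD (x0 :: tl) i 0))
          (PySem.Dict.empty.insert x0 0, x0) = pvProcA tl 1 (PySem.Dict.empty.insert x0 0, x0) := by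
        rw [← pvProcA_eq_foldl_enumerate tl 1, ← hmap]
        exact (List.foldl_map (f := fun j => (j, PySem.List.pyGetD (x0 :: tl) j 0))
          (g := fun st p => pvA_step st p.1 p.2)).symm
      rw [hfold]
    rw [hA]
    unfold collect_numbers_and_indices_alt
    rw [hruns, List.foldl_cons, htl]
    congr 1
    cases k with
    | zero =>
      have hstep : pvB_step (PySem.Dict.empty, none, 0) (x0, 0 + 1) =
          (PySem.Dict.empty.insert x0 0, some x0, 1) := by
        simp [pvB_step]
      rw [hstep]
      simpa using pvProcA_flatten rs hpos (PySem.Dict.empty.insert x0 0) x0 1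
    | succ m =>
      rw [pvProcA_increments m (pvFlattenRuns rs) x0 1 (PySem.Dict.empty.insert x0 0)
            (PySem.Dict.contains_insert_self PySem.Dict.empty x0 0)]
      rw [PySem.Dict.getD_insert_self, PySem.Dict.insert_insert_self]
      have hstep : pvB_step (PySem.Dict.empty, none, 0) (x0, m + 1 + 1) =
          (PySem.Dict.empty.insert x0 (0 + ((m + 1 : Nat) : Int)), some x0, 1 + ((m + 1 : Nat) : Int)) := by
        simp only [pvB_step, PySem.Dict.contains_empty, reduceIte]
        have h1 : (0 : Int) + ((m + 1 + 1 : Nat) : Int) - 1 = 0 + ((m + 1 : Nat) : Int) := by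
          push_cast; ring
        have h2 : (0 : Int) + ((m + 1 + 1 : Nat) : Int) = 1 + ((m + 1 : Nat) : Int) := by
          push_cast; ring
        rw [h1, h2]
      rw [hstep]
      exact pvProcA_flatten rs hpos _ x0 _
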